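-- pv_equiv track=rewrite | github.com/nnnbbb/leetcode | L_system.py | split_path
-- ===== SOURCE A (Python) =====
-- def split_path(path):
--     i = 0
--     l = []
--     while i < len(path):
--         if path[i] == "F":
--             l.append(path[i:i+2])
--             i += 2
--         else:
--             l.append(path[i])
--             i += 1
--     return l
-- ===== SOURCE B (Python) =====
-- import re
--
-- def split_path(path):
--     return re.findall(r'F.|.', path, re.DOTALL)
-- ===== Notes on version B (the rewrite author's own statement) =====
-- stated objective: idiomatic
-- what changed: Replaced the explicit index-arithmetic while loop with a declarative regex tokenizer: re.findall(r'F.|.', path, re.DOTALL), whose left-first alternation groups 'F' with its successor and otherwise emits single characters; the scan runs in C inside the regex engine.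
import Mathlib
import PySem

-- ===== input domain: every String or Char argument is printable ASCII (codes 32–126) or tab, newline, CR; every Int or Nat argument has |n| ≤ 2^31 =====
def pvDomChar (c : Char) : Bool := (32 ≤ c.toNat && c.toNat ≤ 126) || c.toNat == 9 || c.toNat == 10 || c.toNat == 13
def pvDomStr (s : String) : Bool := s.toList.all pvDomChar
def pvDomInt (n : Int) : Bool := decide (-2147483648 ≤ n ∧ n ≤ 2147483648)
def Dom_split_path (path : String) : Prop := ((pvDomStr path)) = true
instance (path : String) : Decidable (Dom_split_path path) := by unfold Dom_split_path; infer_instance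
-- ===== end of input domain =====

-- B replaces the index-arithmetic while loop by the regex tokenizer re.findall(r'F.|.', path, re.DOTALL);
-- return value proved equal to A's on all inputs.

-- ===== PORT A =====
-- A's while loop over the index i, with path[i] and the slice path[i:i+2].
def split_path_go (cs : List Char) (i : Nat) : List String :=
  if h : i < cs.length then
    if cs[i] = 'F' then
      String.ofList (PySem.List.slice cs (some (i : Int)) (some ((i : Int) + 2))) ::
        split_path_go cs (i + 2)
    else
      String.ofList [cs[i]] :: split_path_go cs (i + 1)
  else []
termination_by cs.length - i

def split_path (path : String) : List String := split_path_go path.toList 0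

-- ===== PORT B =====
-- Hand port of re.findall(r'F.|.', path, re.DOTALL) for this fixed pattern (PySem has no regex):
-- findall scans left to right; at each position the alternation is tried left-first, so
-- 'F.' (an 'F' with one following character, DOTALL: any character) wins when it matches,
-- otherwise '.' consumes one character; the scan resumes after each match. Exact for this pattern.
def pyFindall_Fdot_dot : List Char → List String
  | 'F' :: d :: rest => String.ofList ['F', d] :: pyFindall_Fdot_dot rest
  | c :: rest => String.ofList [c] :: pyFindall_Fdot_dot rest
  | [] => []

def split_path_alt (path : String) : List String := pyFindall_Fdot_dot path.toList

-- ===== PRECONDITION & SPEC =====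
def Spec_split_path (path : String) (out : List String) : Prop := out = split_path_alt path
instance (path : String) (out : List String) : Decidable (Spec_split_path path out) := by unfold Spec_split_path; infer_instance

-- ===== CLAIM (what is proved, stated in full; the proofs are below) =====
def Claim_equal_split_path : Prop := ∀ (path : String), Dom_split_path path → Spec_split_path path (split_path path)

-- ===== LEMMAS AND PROOFS =====

theorem drop_cons (cs : List Char) (i : Nat) (h : i < cs.length) :
    cs.drop i = cs[i] :: cs.drop (i + 1) := by
  simp [List.getElem_cons_drop]

theorem slice_two (cs : List Char) (i : Nat) :
    PySem.List.slice cs (some (i : Int)) (some ((i : Int) + 2)) = (cs.drop i).take 2 := by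
  rw [PySem.List.slice_toNat]
  have h1 : ((i : Int) + 2).toNat = i + 2 := by omega
  have h2 : ((i : Int)).toNat = i := by omega
  rw [h1, h2]
  congr 1
  omega
  all_goals omega

theorem findall_cons_ne (c : Char) (rest : List Char) (h : ¬ c = 'F') :
    pyFindall_Fdot_dot (c :: rest) = String.ofList [c] :: pyFindall_Fdot_dot rest := by
  rw [pyFindall_Fdot_dot.eq_def]
  rcases rest with _ | ⟨d, rest'⟩ <;> simp [h]

theorem split_path_go_eq (cs : List Char) (i : Nat) :
    split_path_go cs i = pyFindall_Fdot_dot (cs.drop i) := by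
  fun_induction split_path_go cs i with
  | case1 i h hF ih =>
    rw [drop_cons cs i h, hF, slice_two]
    rw [drop_cons cs i h, hF]
    rcases hd : cs.drop (i + 1) with _ | ⟨d, rest'⟩
    · have h2 : cs.drop (i + 2) = [] := by
        have := congrArg List.tail hd
        simpa [List.tail_drop] using this
      simp [pyFindall_Fdot_dot, h2, ih]
    · have h2 : cs.drop (i + 2) = rest' := by
        have := congrArg List.tail hd
        simpa [List.tail_drop] using this
      simp [pyFindall_Fdot_dot, ih, h2]
  | case2 i h hF ih =>
    rw [drop_cons cs i h, findall_cons_ne _ _ hF, ih]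
  | case3 i h =>
    have : cs.drop i = [] := List.drop_eq_nil_of_le (by omega)
    simp [this, pyFindall_Fdot_dot]

-- ===== VERDICT (by name: the statement is the Claim_ definition above) =====
theorem split_path_spec : Claim_equal_split_path := by
  intro path _
  unfold Spec_split_path split_path split_path_alt
  simpa using split_path_go_eq path.toList 0
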